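-- pv_equiv track=rewrite | github.com/ATyped/ATGQL | atgql/pyutils/natural_compare.py | natural_compare
-- ===== SOURCE A (Python) =====
-- from itertools import takewhile
--
-- def natural_compare(a_str: str, b_str: str) -> int:
--     """
--     Returns a number indicating whether a reference string comes before, or after,
--     or is the same as the given string in natural sort order.
--
--     See: https://en.wikipedia.org/wiki/Natural_sort_order
--     """
--
--     a_idx, b_idx = 0, 0
--
--     while a_idx < len(a_str) and b_idx < len(b_str):
--         a_char = a_str[a_idx]
--         b_char = b_str[b_idx]
--
--         if a_char.isdigit() and b_char.isdigit():
--             a_num_str = str(''.join(takewhile(lambda c: c.isdigit(), a_str[a_idx:])))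
--             a_idx += len(a_num_str)
--             a_num = int(a_num_str)
--
--             b_num_str = str(''.join(takewhile(lambda c: c.isdigit(), b_str[b_idx:])))
--             b_idx += len(b_num_str)
--             b_num = int(b_num_str)
--
--             if a_num < b_num:
--                 return -1
--
--             if a_num > b_num:
--                 return 1
--
--         else:
--             if a_char < b_char:
--                 return -1
--             if a_char > b_char:
--                 return 1
--
--             a_idx += 1
--             b_idx += 1
--
--     return len(a_str) - len(b_str)
-- ===== SOURCE B (Python) =====
-- def natural_compare(a_str: str, b_str: str) -> int:
--     """Natural-order comparison: one in-place index scan; digit runs are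
--     consumed and their values accumulated digit-by-digit, no slicing."""
--     n, m = len(a_str), len(b_str)
--     i = j = 0
--     while i < n and j < m:
--         ac, bc = a_str[i], b_str[j]
--         if ac.isdigit() and bc.isdigit():
--             a_num = 0
--             while i < n and a_str[i].isdigit():
--                 a_num = a_num * 10 + (ord(a_str[i]) - 48)
--                 i += 1
--             b_num = 0
--             while j < m and b_str[j].isdigit():
--                 b_num = b_num * 10 + (ord(b_str[j]) - 48)
--                 j += 1
--             if a_num != b_num:
--                 return -1 if a_num < b_num else 1
--         elif ac != bc:
--             return -1 if ac < bc else 1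
--         else:
--             i += 1
--             j += 1
--     return n - m
-- ===== Notes on version B (the rewrite author's own statement) =====
-- stated objective: faster
-- what changed: A re-slices the remainder string and rejoins a takewhile iterator into a new string (then int()) at every digit run, which is quadratic; B keeps two in-place indices and accumulates each run's value digit by digit in one linear scan with no slicing.
import Mathlib
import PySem

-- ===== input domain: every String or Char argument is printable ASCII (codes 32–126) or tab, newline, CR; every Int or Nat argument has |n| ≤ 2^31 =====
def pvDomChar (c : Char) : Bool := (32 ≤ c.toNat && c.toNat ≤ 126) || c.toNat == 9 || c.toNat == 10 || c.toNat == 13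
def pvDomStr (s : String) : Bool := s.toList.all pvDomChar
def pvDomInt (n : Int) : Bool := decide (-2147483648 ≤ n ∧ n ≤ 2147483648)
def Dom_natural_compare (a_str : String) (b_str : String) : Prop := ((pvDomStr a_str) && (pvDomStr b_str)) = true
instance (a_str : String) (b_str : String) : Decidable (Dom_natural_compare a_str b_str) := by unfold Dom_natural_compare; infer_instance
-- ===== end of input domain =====

-- B replaces A's quadratic slice-and-rejoin handling of digit runs by one in-place
-- index scan that accumulates each run's value digit by digit (objective: faster).

-- ===== PORT A =====
-- int(digit_run): on a nonempty ASCII digit string int() is exactly this fold (exact on Dom: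
-- the run consists of chars '0'..'9' only).
def pvDigitsVal (cs : List Char) : Int :=
  cs.foldl (fun acc c => acc * 10 + ((c.toNat : Int) - 48)) 0

-- the while loop of A on the remaining suffixes a_str[a_idx:], b_str[b_idx:];
-- 'some r' = an early return, 'none' = loop exhausted.
def pvLoopA : List Char → List Char → Option Int
  | ac :: a', bc :: b' =>
    if h : (PySem.Chars.isdigit ac && PySem.Chars.isdigit bc) = true then
      -- ''.join(takewhile(isdigit, rest)) and the index advance by its length
      let aRun := (ac :: a').takeWhile PySem.Chars.isdigit
      let bRun := (bc :: b').takeWhile PySem.Chars.isdigit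
      let aNum := pvDigitsVal aRun
      let bNum := pvDigitsVal bRun
      if aNum < bNum then some (-1)
      else if bNum < aNum then some 1
      else pvLoopA ((ac :: a').drop aRun.length) ((bc :: b').drop bRun.length)
    else
      if ac < bc then some (-1)
      else if bc < ac then some 1
      else pvLoopA a' b'
  | _, _ => none
termination_by a _ => a.length
decreasing_by
  · simp_all
  · simp

def natural_compare (a_str : String) (b_str : String) : Int :=
  match pvLoopA a_str.toList b_str.toList with
  | some r => r
  | none => PySem.Str.len a_str - PySem.Str.len b_str

-- ===== PORT B =====
-- the inner 'while i < n and a_str[i].isdigit()' loop: consume the digit run in place,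
-- accumulating its value; returns (value, remaining suffix).
def pvReadNum : List Char → Int → Int × List Char
  | [], acc => (acc, [])
  | c :: rest, acc =>
    if PySem.Chars.isdigit c then
      pvReadNum rest (acc * 10 + ((c.toNat : Int) - 48))
    else (acc, c :: rest)

theorem pvReadNum_snd_length_le : ∀ (l : List Char) (acc : Int),
    (pvReadNum l acc).2.length ≤ l.length := by
  intro l
  induction l with
  | nil => intro acc; simp [pvReadNum]
  | cons c rest ih =>
    intro acc
    simp only [pvReadNum]
    split
    · exact le_trans (ih _) (Nat.le_succ _)
    · simp

def pvLoopB : List Char → List Char → Option Int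
  | ac :: a', bc :: b' =>
    if (PySem.Chars.isdigit ac && PySem.Chars.isdigit bc) = true then
      let pa := pvReadNum (ac :: a') 0
      let pb := pvReadNum (bc :: b') 0
      if pa.1 ≠ pb.1 then (if pa.1 < pb.1 then some (-1) else some 1)
      else pvLoopB pa.2 pb.2
    else
      if ac ≠ bc then (if ac < bc then some (-1) else some 1)
      else pvLoopB a' b'
  | _, _ => none
termination_by a _ => a.length
decreasing_by
  · simp only [pvReadNum]
    split
    · exact Nat.lt_succ_of_le (pvReadNum_snd_length_le _ _)
    · simp_all
  · simp

def natural_compare_alt (a_str : String) (b_str : String) : Int :=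
  match pvLoopB a_str.toList b_str.toList with
  | some r => r
  | none => PySem.Str.len a_str - PySem.Str.len b_str

-- ===== PRECONDITION & SPEC =====
def Spec_natural_compare (a_str : String) (b_str : String) (out : Int) : Prop := out = natural_compare_alt a_str b_str
instance (a_str : String) (b_str : String) (out : Int) : Decidable (Spec_natural_compare a_str b_str out) := by unfold Spec_natural_compare; infer_instance

-- ===== CLAIM (what is proved, stated in full; the proofs are below) =====
def Claim_equal_natural_compare : Prop := ∀ (a_str : String) (b_str : String), Dom_natural_compare a_str b_str → Spec_natural_compare a_str b_str (natural_compare a_str b_str)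

-- ===== LEMMAS AND PROOFS =====

theorem pvReadNum_eq : ∀ (l : List Char) (acc : Int),
    pvReadNum l acc =
      ((l.takeWhile PySem.Chars.isdigit).foldl
          (fun acc c => acc * 10 + ((c.toNat : Int) - 48)) acc,
        l.dropWhile PySem.Chars.isdigit) := by
  intro l
  induction l with
  | nil => intro acc; simp [pvReadNum]
  | cons c rest ih =>
    intro acc
    by_cases h : PySem.Chars.isdigit c = true
    · simp [pvReadNum, h, ih]
    · simp [pvReadNum, h]

theorem pvDropRun (l : List Char) (p : Char → Bool) :
    l.drop (l.takeWhile p).length = l.dropWhile p := by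
  induction l with
  | nil => simp
  | cons c rest ih =>
    by_cases h : p c = true <;>
      simp [h, ih]

theorem pvLoop_eq : ∀ (n : ℕ) (a b : List Char), a.length ≤ n →
    pvLoopA a b = pvLoopB a b := by
  intro n
  induction n with
  | zero =>
    intro a b h
    have : a = [] := List.eq_nil_of_length_eq_zero (Nat.le_zero.mp h)
    subst this
    cases b <;> simp [pvLoopA, pvLoopB]
  | succ n ih =>
    intro a b h
    match a, b with
    | [], _ => cases b <;> simp [pvLoopA, pvLoopB]
    | ac :: a', [] => simp [pvLoopA, pvLoopB]
    | ac :: a', bc :: b' =>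
      by_cases hd : (PySem.Chars.isdigit ac && PySem.Chars.isdigit bc) = true
      · have hda : PySem.Chars.isdigit ac = true := by simp_all
        have hdb : PySem.Chars.isdigit bc = true := by simp_all
        rw [pvLoopA, pvLoopB]
        simp only [hd, dif_pos, if_pos, pvReadNum_eq, pvDigitsVal]
        rcases lt_trichotomy (pvDigitsVal ((ac :: a').takeWhile PySem.Chars.isdigit))
            (pvDigitsVal ((bc :: b').takeWhile PySem.Chars.isdigit)) with hlt | heq | hgt
        · simp [pvDigitsVal] at hlt
          simp [hlt, ne_of_lt hlt]
        · simp [pvDigitsVal] at heq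
          simp [heq, pvDropRun]
          apply ih
          have h1 : ((ac :: a').dropWhile PySem.Chars.isdigit).length ≤ a'.length := by
            simp [hda]
            exact List.length_dropWhile_le _ _
          have h2 : (ac :: a').length = a'.length + 1 := by simp
          omega
        · simp [pvDigitsVal] at hgt
          simp [hgt, not_lt_of_gt hgt, ne_of_gt hgt]
      · rw [pvLoopA, pvLoopB]
        simp only [hd, dif_neg, if_neg, Bool.not_eq_true]
        by_cases hlt : ac < bc
        · simp [hlt, ne_of_lt hlt]
        · by_cases hgt : bc < ac
          · simp [hlt, hgt, ne_of_gt hgt]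
          · have heq : ac = bc := le_antisymm (not_lt.mp hgt) (not_lt.mp hlt)
            simp [heq]
            exact ih a' b' (by simpa using Nat.le_of_succ_le_succ h)

-- ===== VERDICT (by name: the statement is the Claim_ definition above) =====
theorem natural_compare_spec : Claim_equal_natural_compare := by
  intro a b _
  unfold Spec_natural_compare natural_compare natural_compare_alt
  rw [pvLoop_eq a.toList.length a.toList b.toList le_rfl]
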